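-- pv_equiv track=rewrite | github.com/cmbrandenburg/project-euler | LEGACY/python/pe138/pe138.py | solve
-- ===== SOURCE A (Python) =====
-- def ptriple(m, n):
-- 	return m**2-n**2, 2*m*n, m**2+n**2
--
-- def solve(N):
-- 	acc = 0
-- 	cnt = 0
-- 	m = 4
-- 	n = 1
-- 	b = 0
-- 	bqueue = []
-- 	cqueue = []
-- 	while True:
-- 		bprev = b
-- 		a, b, c = ptriple(m, n)
-- 		bqueue.append(b)
-- 		cqueue.append(c)
-- 		acc += c
-- 		cnt += 1
-- 		if cnt == N:
-- 			return acc
-- 		n = m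
-- 		if cnt%2 != 0:
-- 			m = cqueue.pop(0)
-- 		else:
-- 			m = (bqueue[0]+bqueue[1]) // 2
-- 			bqueue.pop(0)
-- ===== SOURCE B (Python) =====
-- def solve(N):
-- 	# PE-138 hypotenuse values satisfy the second-order linear recurrence below;
-- 	# run the linear recurrence with a running sum.
-- 	acc = 0
-- 	a, b = 17, 305
-- 	for _ in range(N):
-- 		acc += a
-- 		a, b = b, 18 * b - a
-- 	return acc
-- ===== Notes on version B (the rewrite author's own statement) =====
-- stated objective: faster
-- what changed: Replaces the Pythagorean-triple generator with its m,n state and two pop(0) queues by the known second-order linear recurrence on the hypotenuse values, kept as a sliding pair with a running sum.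
import Mathlib
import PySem

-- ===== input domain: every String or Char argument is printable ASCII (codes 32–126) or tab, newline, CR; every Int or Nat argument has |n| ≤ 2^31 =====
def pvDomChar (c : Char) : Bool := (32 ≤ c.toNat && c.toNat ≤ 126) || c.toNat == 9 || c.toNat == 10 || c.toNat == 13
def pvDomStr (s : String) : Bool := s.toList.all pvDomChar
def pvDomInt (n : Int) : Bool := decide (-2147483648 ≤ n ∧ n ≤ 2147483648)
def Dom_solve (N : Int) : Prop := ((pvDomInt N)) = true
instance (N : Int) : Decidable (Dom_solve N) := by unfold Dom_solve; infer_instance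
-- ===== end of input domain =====

-- B replaces A's Pythagorean-triple generator with two pop(0) queues by the second-order
-- linear recurrence on the hypotenuse values with a running sum (objective: faster, measured).

-- ===== PORT A =====
-- the while-True loop, run with fuel N.toNat (the loop returns exactly at cnt = N;
-- for N < 1 Python loops forever — excluded by Pre_solve, the fuel-0 value is never used there)
def solveLoop (N : Int) : Nat → Int → Int → Int → Int → List Int → List Int → Int
  | 0, acc, _, _, _, _, _ => acc
  | f+1, acc, cnt, m, n, bqueue, cqueue =>
    -- a, b, c = ptriple(m, n); a = m**2 - n**2 is never used afterwards (nor is bprev)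
    let b := 2*m*n
    let c := m^2 + n^2
    let bq := bqueue ++ [b]
    let cq := cqueue ++ [c]
    let acc' := acc + c
    let cnt' := cnt + 1
    if cnt' = N then acc'
    else if PySem.Int.mod cnt' 2 ≠ 0 then
      -- m = cqueue.pop(0): head + tail; cq was just appended to, so it is nonempty
      solveLoop N f acc' cnt' (cq.headD 0) m bq cq.tail
    else
      -- m = (bqueue[0] + bqueue[1]) // 2; bqueue.pop(0)
      -- both indices are in range whenever this branch runs (cnt' even ≥ 2), so pyGetD is exact
      solveLoop N f acc' cnt' (PySem.Int.floordiv (PySem.List.pyGetD bq 0 0 + PySem.List.pyGetD bq 1 0) 2) m bq.tail cq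

def solve (N : Int) : Int := solveLoop N N.toNat 0 0 4 1 [] []

-- ===== PORT B =====
def altLoop : Nat → Int → Int → Int → Int
  | 0, acc, _, _ => acc
  | f+1, acc, a, b => altLoop f (acc + a) b (18*b - a)

def solve_alt (N : Int) : Int := altLoop N.toNat 0 17 305

-- ===== PRECONDITION & SPEC =====
-- Pre_ excludes N < 1, where Python's A never reaches cnt == N and loops forever.
def Pre_solve (N : Int) : Prop := 1 ≤ N
instance (N : Int) : Decidable (Pre_solve N) := by unfold Pre_solve; infer_instance
def pvWitness_solve : Int := 3

def Spec_solve (N : Int) (out : Int) : Prop := out = solve_alt N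
instance (N : Int) (out : Int) : Decidable (Spec_solve N out) := by unfold Spec_solve; infer_instance

-- ===== CLAIM (what is proved, stated in full; the proofs are below) =====
def Claim_equal_solve : Prop := ∀ (N : Int), Dom_solve N → Pre_solve N → Spec_solve N (solve N)

-- ===== LEMMAS AND PROOFS =====

-- the m-sequence of A: m(k+1) = 4*m(k) + m(k-1), starting 1, 4
def M : Nat → Int
  | 0 => 1
  | 1 => 4
  | n+2 => 4 * M (n+1) + M n

-- hypotenuse and even-leg values of the k-th triple produced by A (index ≥ 1; value at 0 unused)
def Cf : Nat → Int
  | 0 => 2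
  | j+1 => M (j+1)^2 + M j^2

def Bf : Nat → Int
  | 0 => 2
  | j+1 => 2 * M (j+1) * M j

-- running sum of the hypotenuses
def Sf : Nat → Int
  | 0 => 0
  | k+1 => Sf k + Cf (k+1)

-- contents of A's two queues at the top of the loop with cnt = k
def BqL (k : Nat) : List Int := (List.range' (k/2+1) (k - k/2)).map Bf
def CqL (k : Nat) : List Int := (List.range' ((k+1)/2+1) (k - (k+1)/2)).map Cf

lemma Mrec (n : Nat) : M (n+2) = 4 * M (n+1) + M n := by simp [M]

lemma doubling (j : Nat) :
    M (2*j+2) = Cf (j+1) ∧ M (2*j+3) = M (j+1) * (M j + M (j+2)) := by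
  induction j with
  | zero => constructor <;> decide
  | succ j ih =>
    obtain ⟨h1, h2⟩ := ih
    have r1 : M (2*(j+1)+2) = 4 * M (2*j+3) + M (2*j+2) := by
      rw [show 2*(j+1)+2 = (2*j+2)+2 from by ring, Mrec, show 2*j+2+1 = 2*j+3 from by omega]
    have r2 : M (2*(j+1)+3) = 4 * M (2*(j+1)+2) + M (2*j+3) := by
      rw [show 2*(j+1)+3 = (2*j+3)+2 from by ring, Mrec,
        show 2*j+3+1 = 2*(j+1)+2 from by ring]
    have mj2 : M (j+2) = 4 * M (j+1) + M j := Mrec j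
    have mj3 : M (j+3) = 4 * M (j+2) + M (j+1) := Mrec (j+1)
    constructor
    · rw [r1, h1, h2]
      simp only [Cf, mj2]
      ring
    · rw [r2, r1, h1, h2, mj3, mj2]
      simp only [Cf]
      ring

lemma crec (j : Nat) : Cf (j+3) = 18 * Cf (j+2) - Cf (j+1) := by
  have mj2 : M (j+2) = 4 * M (j+1) + M j := Mrec j
  have mj3 : M (j+3) = 4 * M (j+2) + M (j+1) := Mrec (j+1)
  simp only [Cf, mj3, mj2]
  ring

lemma altLoop_inv (f : Nat) : ∀ k : Nat,
    altLoop f (Sf k) (Cf (k+1)) (Cf (k+2)) = Sf (k+f) := by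
  induction f with
  | zero => intro k; simp [altLoop]
  | succ f ih =>
    intro k
    have h18 : (18 : Int) * Cf (k+2) - Cf (k+1) = Cf (k+3) := by rw [crec]
    calc altLoop (f+1) (Sf k) (Cf (k+1)) (Cf (k+2))
        = altLoop f (Sf k + Cf (k+1)) (Cf (k+2)) (18 * Cf (k+2) - Cf (k+1)) := rfl
      _ = altLoop f (Sf (k+1)) (Cf (k+2)) (Cf (k+3)) := by rw [h18]; rfl
      _ = Sf (k+1+f) := ih (k+1)
      _ = Sf (k+(f+1)) := by ring_nf

lemma loopA_inv (N : Int) : ∀ f k : Nat, (k : Int) < N → (f : Int) = N - k →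
    solveLoop N f (Sf k) k (M (k+1)) (M k) (BqL k) (CqL k) = Sf N.toNat := by
  intro f
  induction f with
  | zero => intro k hk hf; omega
  | succ f ih =>
    intro k hk hf
    rcases Nat.even_or_odd k with he | ⟨t, ht⟩
    · -- k = 2*t : cnt' = 2t+1 is odd
      obtain ⟨t, ht⟩ : ∃ t, k = 2*t := by obtain ⟨t, ht⟩ := he; exact ⟨t, by omega⟩
      subst ht
      have hb : 2 * M (2*t+1) * M (2*t) = Bf (2*t+1) := by simp [Bf]
      have hc : M (2*t+1)^2 + M (2*t)^2 = Cf (2*t+1) := by simp [Cf]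
      by_cases hret : ((2*t : Nat) : Int) + 1 = N
      · have hN : N.toNat = 2*t+1 := by omega
        simp only [solveLoop, hb, hc, if_pos hret, hN, Sf]
      · have hodd : PySem.Int.mod (((2*t : Nat) : Int) + 1) 2 ≠ 0 := by
          rw [PySem.Int.mod_eq_emod_of_pos (by norm_num)]
          omega
        have hbq : BqL (2*t) ++ [Bf (2*t+1)] = BqL (2*t+1) := by
          simp only [BqL, show (2*t)/2 = t from by omega, show (2*t+1)/2 = t from by omega,
            show 2*t - t = t from by omega, show 2*t+1 - t = t+1 from by omega]
          rw [show [Bf (2*t+1)] = List.map Bf [2*t+1] from rfl, ← List.map_append,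
            show (2*t+1 : Nat) = t+1+t from by omega, ← List.range'_1_concat]
        have hcqHead : (CqL (2*t) ++ [Cf (2*t+1)]).headD 0 = Cf (t+1) := by
          simp only [CqL, show (2*t+1)/2 = t from by omega, show 2*t - t = t from by omega]
          cases t with
          | zero => simp
          | succ s =>
            rw [List.range'_succ]
            simp
        have hcqTail : (CqL (2*t) ++ [Cf (2*t+1)]).tail = CqL (2*t+1) := by
          simp only [CqL, show (2*t+1)/2 = t from by omega, show (2*t+2)/2 = t+1 from by omega,
            show 2*t - t = t from by omega, show 2*t+1 - (t+1) = t from by omega]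
          rw [show [Cf (2*t+1)] = List.map Cf [2*t+1] from rfl, ← List.map_append,
            show (2*t+1 : Nat) = t+1+t from by omega, ← List.range'_1_concat,
            List.range'_succ]
          simp
        have hm : Cf (t+1) = M (2*t+2) := ((doubling t).1).symm
        have hstep := ih (2*t+1) (by push_cast; push_cast at hk hf; omega)
          (by push_cast at hf ⊢; omega)
        simp only [solveLoop, hb, hc, if_neg hret, if_pos hodd, hcqHead, hcqTail, hbq, hm]
        rw [show ((2*t : Nat) : Int) + 1 = ((2*t+1 : Nat) : Int) from by push_cast; ring,
          show M (2*t+2) = M ((2*t+1)+1) from rfl,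
          show Sf (2*t) + Cf (2*t+1) = Sf (2*t+1) from by simp [Sf]]
        exact hstep
    · -- k = 2*t+1 : cnt' = 2t+2 is even
      subst ht
      have hb : 2 * M (2*t+1+1) * M (2*t+1) = Bf (2*t+2) := by
        rw [show 2*t+1+1 = 2*t+2 from by omega]; simp [Bf]
      have hc : M (2*t+1+1)^2 + M (2*t+1)^2 = Cf (2*t+2) := by
        rw [show 2*t+1+1 = 2*t+2 from by omega]; simp [Cf]
      by_cases hret : ((2*t+1 : Nat) : Int) + 1 = N
      · have hN : N.toNat = 2*t+2 := by omega
        simp only [solveLoop, hb, hc, if_pos hret, hN, Sf]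
      · have heven : ¬ PySem.Int.mod (((2*t+1 : Nat) : Int) + 1) 2 ≠ 0 := by
          rw [PySem.Int.mod_eq_emod_of_pos (by norm_num)]
          push_cast
          omega
        -- bq after the append is Bf applied to t+1, t+2, …, 2t+2
        have hbq1 : BqL (2*t+1) ++ [Bf (2*t+2)] = (List.range' (t+1) (t+2)).map Bf := by
          simp only [BqL, show (2*t+1)/2 = t from by omega, show 2*t+1 - t = t+1 from by omega]
          rw [show [Bf (2*t+2)] = List.map Bf [2*t+2] from rfl, ← List.map_append,
            show (2*t+2 : Nat) = t+1+(t+1) from by omega, ← List.range'_1_concat]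
        have hget0 : PySem.List.pyGetD ((List.range' (t+1) (t+2)).map Bf) 0 0 = Bf (t+1) := by
          rw [List.range'_succ]
          simp [PySem.List.pyGetD, PySem.List.pyIdx?, PySem.List.pyGet?,
            show (0:Int) ≤ (t:Int) + 1 from by positivity]
        have hget1 : PySem.List.pyGetD ((List.range' (t+1) (t+2)).map Bf) 1 0 = Bf (t+2) := by
          rw [List.range'_succ, List.range'_succ]
          simp [PySem.List.pyGetD, PySem.List.pyIdx?, PySem.List.pyGet?]
        have hmid : PySem.Int.floordiv (Bf (t+1) + Bf (t+2)) 2 = M (2*t+3) := by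
          have h2x : Bf (t+1) + Bf (t+2) = 2 * (M (t+1) * (M t + M (t+2))) := by
            simp only [Bf]
            ring
          rw [h2x, PySem.Int.floordiv_eq_ediv_of_pos (by norm_num),
            Int.mul_ediv_cancel_left _ (by norm_num), (doubling t).2]
        have hbqTail : ((List.range' (t+1) (t+2)).map Bf).tail = BqL (2*t+2) := by
          rw [List.range'_succ]
          simp only [List.map_cons, List.tail_cons, BqL,
            show (2*t+2)/2 = t+1 from by omega, show 2*t+2 - (t+1) = t+1 from by omega]
        have hcq : CqL (2*t+1) ++ [Cf (2*t+2)] = CqL (2*t+2) := by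
          simp only [CqL, show (2*t+2)/2 = t+1 from by omega, show (2*t+3)/2 = t+1 from by omega,
            show 2*t+1 - (t+1) = t from by omega, show 2*t+2 - (t+1) = t+1 from by omega]
          rw [show [Cf (2*t+2)] = List.map Cf [2*t+2] from rfl, ← List.map_append,
            show (2*t+2 : Nat) = t+2+t from by omega, ← List.range'_1_concat]
        have hstep := ih (2*t+2) (by push_cast; push_cast at hk hf; omega)
          (by push_cast at hf ⊢; omega)
        simp only [solveLoop, hb, hc, if_neg hret, if_neg heven, hbq1, hget0, hget1, hmid,
          hbqTail, hcq]
        rw [show ((2*t+1 : Nat) : Int) + 1 = ((2*t+2 : Nat) : Int) from by push_cast; ring,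
          show M (2*t+3) = M ((2*t+2)+1) from rfl,
          show Sf (2*t+1) + Cf (2*t+2) = Sf (2*t+2) from by simp [Sf]]
        exact hstep

-- ===== VERDICT (by name: the statement is the Claim_ definition above) =====
theorem solve_spec : Claim_equal_solve := by
  intro N _ hpre
  have h1 : (1 : Int) ≤ N := hpre
  unfold Spec_solve solve solve_alt
  have hA := loopA_inv N N.toNat 0 (by omega) (by omega)
  simp only [show Sf 0 = 0 from rfl, show M 1 = 4 from rfl, show M 0 = 1 from rfl,
    BqL, CqL] at hA
  norm_num at hA
  rw [hA]
  have hB := altLoop_inv N.toNat 0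
  simp only [zero_add] at hB
  rw [show (17 : Int) = Cf 1 from by decide, show (305 : Int) = Cf 2 from by decide,
    show (0 : Int) = Sf 0 from rfl, hB]
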